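-- pv_equiv track=rewrite | github.com/nanowell/OpenAI-Agents | get_max_spanning_tree.py | get_max_spanning_tree
-- ===== SOURCE A (Python) =====
-- def get_distance(p1, p2):
--     return sum([abs(p1[i] - p2[i]) for i in range(len(p1))])
--
-- def get_max_spanning_tree(d, k, D):
--     nodes = [(i, j) for i in range(d) for j in range(D[i])]
--     edges = []
--     for i in range(len(nodes)):
--         for j in range(i + 1, len(nodes)):
--             edges.append((nodes[i], nodes[j], get_distance(nodes[i], nodes[j])))
--
--     edges.sort(key=lambda x: x[2])
--
--     visited = set()
--     total_weight = 0
--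
--     while len(visited) < d:
--         edge = None
--         for e in edges:
--             if e[0] not in visited and e[1] not in visited:
--                 edge = e
--                 break
--
--         if edge is None:
--             return -1
--
--         visited.add(edge[0])
--         visited.add(edge[1])
--
--         total_weight += edge[2] % (10 ** 9 + 7)
--
--     return total_weight
-- ===== SOURCE B (Python) =====
-- def get_max_spanning_tree(d, k, D):
--     # Same greedy selection as the original, but a single left-to-right pass over the
--     # sorted edge list replaces the restarted linear scan per selection: once an edge is
--     # skipped because an endpoint is visited, it stays skipped, so no restart is needed
--     # and each edge is examined at most once.
--     nodes = [(i, j) for i in range(d) for j in range(D[i])]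
--     edges = sorted(
--         ((a, b, abs(a[0] - b[0]) + abs(a[1] - b[1]))
--          for ia, a in enumerate(nodes) for b in nodes[ia + 1:]),
--         key=lambda e: e[2])
--     visited = set()
--     total = 0
--     for a, b, w in edges:
--         if len(visited) >= d:
--             return total
--         if a not in visited and b not in visited:
--             visited.add(a)
--             visited.add(b)
--             total += w % (10 ** 9 + 7)
--     return total if len(visited) >= d else -1
-- ===== Notes on version B (the rewrite author's own statement) =====
-- stated objective: faster
-- what changed: The greedy selection loop, which restarts a linear scan of the whole sorted edge list for every selected edge, is replaced by a single advancing pass over the sorted edge list (an edge once skipped stays skipped because the visited set only grows), so each edge is examined at most once; intended as faster: a timing run measured about 2.1x (edge generation and sorting, shared by both, dominate at the largest sizes).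
import Mathlib
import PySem

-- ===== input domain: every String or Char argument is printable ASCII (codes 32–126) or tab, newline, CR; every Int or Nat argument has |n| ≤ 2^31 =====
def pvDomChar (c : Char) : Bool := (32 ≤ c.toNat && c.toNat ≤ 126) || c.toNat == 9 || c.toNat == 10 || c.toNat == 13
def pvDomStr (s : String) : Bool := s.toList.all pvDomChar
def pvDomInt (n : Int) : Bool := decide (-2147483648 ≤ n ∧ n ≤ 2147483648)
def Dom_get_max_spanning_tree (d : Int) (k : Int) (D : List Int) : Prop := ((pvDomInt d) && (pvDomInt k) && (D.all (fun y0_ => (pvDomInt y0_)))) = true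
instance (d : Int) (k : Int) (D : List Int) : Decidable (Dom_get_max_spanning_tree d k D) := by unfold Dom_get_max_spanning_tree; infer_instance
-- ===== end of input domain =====

-- B replaces A's per-selection restarted scan of the sorted edge list by one advancing pass
-- (an edge skipped once stays skipped since the visited set only grows); objective: faster (measured ~2x).

-- ===== PORT A =====

-- get_distance(p1, p2) on the 2-tuples used here: sum over range(len(p1)) unrolled to the
-- two components (exact: every node is a pair).
def pvDist (p1 p2 : Int × Int) : Int := |p1.1 - p2.1| + |p1.2 - p2.2|

-- nodes = [(i, j) for i in range(d) for j in range(D[i])]; D[i] via pyGetD (the IndexError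
-- case d > len(D) is excluded by Pre_).
def pvNodes (d : Int) (D : List Int) : List (Int × Int) :=
  (PySem.List.pyRange 0 d).flatMap (fun i =>
    (PySem.List.pyRange 0 (PySem.List.pyGetD D i 0)).map (fun j => (i, j)))

-- the double index loop 'for i: for j in range(i+1, ...): edges.append(...)' — an
-- append-only loop, ported as the comprehension it computes (indexing via pyGetD)
def pvEdgesA (nodes : List (Int × Int)) : List ((Int × Int) × (Int × Int) × Int) :=
  (PySem.List.pyRange 0 (PySem.List.len nodes)).flatMap (fun i =>
    (PySem.List.pyRange (i + 1) (PySem.List.len nodes)).map (fun j =>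
      (PySem.List.pyGetD nodes i (0, 0), PySem.List.pyGetD nodes j (0, 0),
        pvDist (PySem.List.pyGetD nodes i (0, 0)) (PySem.List.pyGetD nodes j (0, 0)))))

-- 'e[0] not in visited and e[1] not in visited' (shared by both ports: same Python test)
def pvBothUnvisited (v : PySem.Set (Int × Int)) (e : (Int × Int) × (Int × Int) × Int) : Bool :=
  !PySem.Set.contains v e.1 && !PySem.Set.contains v e.2.1

-- termination helper for A's while loop: selecting an edge with a fresh endpoint grows visited
lemma pvLenAdd (v : PySem.Set (Int × Int)) (a : Int × Int) :
    PySem.Set.len v ≤ PySem.Set.len (PySem.Set.add v a) ∧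
    (PySem.Set.contains v a = false → PySem.Set.len (PySem.Set.add v a) = PySem.Set.len v + 1) := by
  simp [PySem.Set.add, PySem.Set.len]
  split <;> simp_all

-- A's while loop: restart the scan (find? over the WHOLE sorted list) for every selection
def pvALoop (d : Int) (edges : List ((Int × Int) × (Int × Int) × Int))
    (visited : PySem.Set (Int × Int)) (total : Int) : Int :=
  if PySem.Set.len visited < d then
    match h : edges.find? (pvBothUnvisited visited) with
    | none => -1
    | some e =>
        pvALoop d edges (PySem.Set.add (PySem.Set.add visited e.1) e.2.1)
          (total + PySem.Int.mod e.2.2 (10 ^ 9 + 7))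
  else total
termination_by (d - PySem.Set.len visited).toNat
decreasing_by
  have h1 := List.find?_some h
  simp only [pvBothUnvisited, Bool.and_eq_true, Bool.not_eq_true'] at h1
  have h2 := (pvLenAdd visited e.1).2 h1.1
  have h3 := (pvLenAdd (PySem.Set.add visited e.1) e.2.1).1
  omega

-- edges.sort(key=lambda x: x[2]): Python's stable sort by the key; List.mergeSort with
-- '≤' on the key is exactly that stable sort (PySem.List.sorted computes the same list
-- but is quadratic, which the behavioural evaluator cannot run on large edge lists)
def get_max_spanning_tree (d : Int) (k : Int) (D : List Int) : Int :=
  pvALoop d ((pvEdgesA (pvNodes d D)).mergeSort (fun a b => decide (a.2.2 ≤ b.2.2)))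
    PySem.Set.empty 0

-- ===== PORT B =====

-- B's single pass: 'for a, b, w in edges: ...' with the two early-return tests, then the
-- final 'total if len(visited) >= d else -1'
def pvBLoop (d : Int) (es : List ((Int × Int) × (Int × Int) × Int))
    (visited : PySem.Set (Int × Int)) (total : Int) : Int :=
  match es with
  | [] => if d ≤ PySem.Set.len visited then total else -1
  | e :: rest =>
      if d ≤ PySem.Set.len visited then total
      else if pvBothUnvisited visited e then
        pvBLoop d rest (PySem.Set.add (PySem.Set.add visited e.1) e.2.1)
          (total + PySem.Int.mod e.2.2 (10 ^ 9 + 7))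
      else pvBLoop d rest visited total

-- edges = sorted(((a, b, |a0-b0|+|a1-b1|) for ia, a in enumerate(nodes) for b in nodes[ia+1:]), key=e[2])
def pvEdgesB (nodes : List (Int × Int)) : List ((Int × Int) × (Int × Int) × Int) :=
  (PySem.List.enumerate nodes).flatMap (fun p =>
    (PySem.List.slice nodes (some (p.1 + 1))).map (fun b =>
      (p.2, b, |p.2.1 - b.1| + |p.2.2 - b.2|)))

-- sorted(..., key=lambda e: e[2]) ported as the same stable sort
def get_max_spanning_tree_alt (d : Int) (k : Int) (D : List Int) : Int :=
  pvBLoop d ((pvEdgesB (pvNodes d D)).mergeSort (fun a b => decide (a.2.2 ≤ b.2.2)))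
    PySem.Set.empty 0

-- ===== PRECONDITION & SPEC =====
-- Pre_ excludes exactly the IndexError inputs: the comprehension reads D[i] for every
-- i in range(d), so A (and B) raise iff d > len(D).
def Pre_get_max_spanning_tree (d : Int) (k : Int) (D : List Int) : Prop :=
  d ≤ (D.length : Int)
instance (d : Int) (k : Int) (D : List Int) : Decidable (Pre_get_max_spanning_tree d k D) := by
  unfold Pre_get_max_spanning_tree; infer_instance

def pvWitness_get_max_spanning_tree : Int × Int × List Int := (2, 0, [2, 1])

def Spec_get_max_spanning_tree (d : Int) (k : Int) (D : List Int) (out : Int) : Prop :=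
  out = get_max_spanning_tree_alt d k D
instance (d : Int) (k : Int) (D : List Int) (out : Int) :
    Decidable (Spec_get_max_spanning_tree d k D out) := by
  unfold Spec_get_max_spanning_tree; infer_instance

-- ===== CLAIM (what is proved, stated in full; the proofs are below) =====
def Claim_equal_get_max_spanning_tree : Prop :=
  ∀ (d : Int) (k : Int) (D : List Int), Dom_get_max_spanning_tree d k D →
    Pre_get_max_spanning_tree d k D →
    Spec_get_max_spanning_tree d k D (get_max_spanning_tree d k D)

-- ===== LEMMAS AND PROOFS =====

-- common shape of the unsorted edge list: all ordered pairs of the node list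
def pvPairs {α β : Type} (F : α → α → β) : List α → List β
  | [] => []
  | a :: t => t.map (F a) ++ pvPairs F t

-- reading nodes[k:] back from indices: map of pyGetD over pyRange k (len l) is drop k
lemma pvMapGet {α : Type} (dflt : α) :
    ∀ (t : List α) (k : Nat) (l : List α), l.drop k = t →
      (PySem.List.pyRange (k : Int) (PySem.List.len l)).map
        (fun j => PySem.List.pyGetD l j dflt) = t := by
  intro t
  induction t with
  | nil =>
      intro k l h
      rw [PySem.List.pyRange_one_eq_nil
        (by have := List.drop_eq_nil_iff.mp h; simp [PySem.List.len]; omega)]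
      rfl
  | cons a t ih =>
      intro k l h
      have hk : k < l.length := by
        by_contra hc
        rw [List.drop_eq_nil_of_le (by omega)] at h
        exact absurd h (by simp)
      rw [PySem.List.pyRange_one_cons (by simp [PySem.List.len]; omega), List.map_cons]
      have h1 : PySem.List.pyGetD l (k : Int) dflt = a := by
        rw [PySem.List.pyGetD_eq_getElem l dflt (by omega) (by exact_mod_cast hk)]
        have h0 : 0 < (l.drop k).length := by rw [h]; simp
        have h3 := List.getElem_drop (xs := l) (i := k) (j := 0) (h := h0)
        simp [h] at h3
        simp [h3.symm]
      have h2 : ((k : Int) + 1) = ((k + 1 : Nat) : Int) := by push_cast; ring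
      rw [h1, h2, ih (k+1) l (by rw [← List.drop_drop, h]; rfl)]

-- A's index-pair generation equals pvPairs
lemma pvAgen {α β : Type} (F : α → α → β) (dflt : α) :
    ∀ (t : List α) (k : Nat) (l : List α), l.drop k = t →
      (PySem.List.pyRange (k : Int) (PySem.List.len l)).flatMap (fun i =>
        (PySem.List.pyRange (i + 1) (PySem.List.len l)).map (fun j =>
          F (PySem.List.pyGetD l i dflt) (PySem.List.pyGetD l j dflt))) = pvPairs F t := by
  intro t
  induction t with
  | nil =>
      intro k l h
      rw [PySem.List.pyRange_one_eq_nil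
        (by have := List.drop_eq_nil_iff.mp h; simp [PySem.List.len]; omega)]
      rfl
  | cons a t ih =>
      intro k l h
      have hk : k < l.length := by
        by_contra hc
        rw [List.drop_eq_nil_of_le (by omega)] at h
        exact absurd h (by simp)
      have hdrop : l.drop (k+1) = t := by rw [← List.drop_drop, h]; rfl
      have ha : PySem.List.pyGetD l (k : Int) dflt = a := by
        have h0 : 0 < (l.drop k).length := by rw [h]; simp
        have h2 := List.getElem_drop (xs := l) (i := k) (j := 0) (h := h0)
        rw [PySem.List.pyGetD_eq_getElem l dflt (by omega) (by exact_mod_cast hk)]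
        simp [h] at h2
        simp [h2.symm]
      rw [PySem.List.pyRange_one_cons (by simp [PySem.List.len]; omega), List.flatMap_cons]
      have h2 : ((k : Int) + 1) = ((k + 1 : Nat) : Int) := by push_cast; ring
      rw [ha, h2, ih (k+1) l hdrop,
        show (fun j => F a (PySem.List.pyGetD l j dflt)) =
          (F a) ∘ (fun j => PySem.List.pyGetD l j dflt) from rfl,
        ← List.map_map, pvMapGet dflt t (k+1) l hdrop]
      rfl

-- B's enumerate/slice generation equals pvPairs
lemma pvBgen {α β : Type} (F : α → α → β) :
    ∀ (t : List α) (k : Nat) (l : List α), l.drop k = t →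
      (PySem.List.enumerate t (k : Int)).flatMap (fun p =>
        (PySem.List.slice l (some (p.1 + 1))).map (fun b => F p.2 b)) = pvPairs F t := by
  intro t
  induction t with
  | nil => intro k l h; simp [PySem.List.enumerate, pvPairs]
  | cons a t ih =>
      intro k l h
      have hdrop : l.drop (k+1) = t := by rw [← List.drop_drop, h]; rfl
      have hcons : PySem.List.enumerate (a :: t) (k : Int) =
          ((k : Int), a) :: PySem.List.enumerate t ((k : Int) + 1) := by
        simp [PySem.List.enumerate]
      rw [hcons, List.flatMap_cons]
      have h2 : ((k : Int) + 1) = ((k + 1 : Nat) : Int) := by push_cast; ring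
      rw [h2, ih (k+1) l hdrop]
      have hsl : PySem.List.slice l (some ((k+1 : Nat) : Int)) = l.drop (k+1) := by
        rw [PySem.List.slice_from l (by omega)]
        simp
      rw [hsl, hdrop]
      rfl

-- the two unsorted edge lists coincide
lemma pvEdges_eq (nodes : List (Int × Int)) : pvEdgesA nodes = pvEdgesB nodes := by
  unfold pvEdgesA pvEdgesB
  have hA := pvAgen (fun a b => (a, b, pvDist a b)) ((0, 0) : Int × Int) nodes 0 nodes rfl
  have hB := pvBgen (fun a b : Int × Int => (a, b, |a.1 - b.1| + |a.2 - b.2|)) nodes 0 nodes rfl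
  simp only [Nat.cast_zero] at hA hB
  exact hA.trans hB.symm

-- membership in a Set is preserved by add
lemma pvContains_add (v : PySem.Set (Int × Int)) (y x : Int × Int)
    (h : PySem.Set.contains v x = true) :
    PySem.Set.contains (PySem.Set.add v y) x = true := by
  simp only [PySem.Set.contains, List.contains_iff_mem] at h ⊢
  exact (PySem.Set.mem_add v y x).mpr (Or.inl h)

lemma pvContains_add_self (v : PySem.Set (Int × Int)) (x : Int × Int) :
    PySem.Set.contains (PySem.Set.add v x) x = true := by
  simp only [PySem.Set.contains, List.contains_iff_mem]
  exact (PySem.Set.mem_add v x x).mpr (Or.inr rfl)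

-- visited only grows, so a test that failed keeps failing
lemma pvUnvisited_mono (v : PySem.Set (Int × Int)) (x : Int × Int)
    (e : (Int × Int) × (Int × Int) × Int) (h : pvBothUnvisited v e = false) :
    pvBothUnvisited (PySem.Set.add v x) e = false := by
  unfold pvBothUnvisited at h ⊢
  cases hc1 : PySem.Set.contains v e.1 with
  | true => rw [pvContains_add v x e.1 hc1]; rfl
  | false =>
      cases hc2 : PySem.Set.contains v e.2.1 with
      | true =>
          rw [pvContains_add v x e.2.1 hc2]
          simp
      | false =>
          rw [hc1, hc2] at h
          exact absurd h (by simp)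

-- the core: restarted scans over pre ++ es, with every edge of pre already failing,
-- compute exactly the single pass over es
lemma pvLoop_eq (d : Int) :
    ∀ (es pre : List ((Int × Int) × (Int × Int) × Int)) (v : PySem.Set (Int × Int)) (t : Int),
      (∀ e ∈ pre, pvBothUnvisited v e = false) →
      pvALoop d (pre ++ es) v t = pvBLoop d es v t := by
  intro es
  induction es with
  | nil =>
      intro pre v t hpre
      rw [pvALoop.eq_def, pvBLoop]
      by_cases hd : PySem.Set.len v < d
      · rw [if_pos hd, if_neg (by omega)]
        have hnone : (pre ++ []).find? (pvBothUnvisited v) = none := by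
          rw [List.append_nil]
          exact List.find?_eq_none.mpr (fun x hx => by simp [hpre x hx])
        split
        · rfl
        · rename_i e he
          rw [hnone] at he
          exact absurd he (by simp)
      · rw [if_neg hd, if_pos (by omega)]
  | cons e rest ih =>
      intro pre v t hpre
      rw [pvBLoop]
      by_cases hd : PySem.Set.len v < d
      · rw [if_neg (by omega)]
        by_cases hp : pvBothUnvisited v e = true
        · -- A's restarted scan finds exactly e
          have hfind : (pre ++ e :: rest).find? (pvBothUnvisited v) = some e := by
            rw [List.find?_append, List.find?_eq_none.mpr (fun x hx => by simp [hpre x hx]),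
              Option.none_or, List.find?_cons_of_pos (p := pvBothUnvisited v) (l := rest) hp]
          rw [if_pos hp, pvALoop.eq_def, if_pos hd]
          split
          · rename_i he
            rw [hfind] at he
            exact absurd he (by simp)
          · rename_i e' he
            rw [hfind] at he
            obtain rfl : e' = e := by injection he with h'; exact h'.symm
            rw [show pre ++ e' :: rest = (pre ++ [e']) ++ rest by simp]
            apply ih
            intro x hx
            rcases List.mem_append.mp hx with hx | hx
            · exact pvUnvisited_mono _ _ _ (pvUnvisited_mono _ _ _ (hpre x hx))
            · obtain rfl : x = e' := by simpa using hx
              unfold pvBothUnvisited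
              rw [pvContains_add (PySem.Set.add v x.1) x.2.1 x.1 (pvContains_add_self v x.1)]
              rfl
        · rw [if_neg hp]
          rw [show pre ++ e :: rest = (pre ++ [e]) ++ rest by simp]
          apply ih
          intro x hx
          rcases List.mem_append.mp hx with hx | hx
          · exact hpre x hx
          · obtain rfl : x = e := by simpa using hx
            simpa using hp
      · rw [if_pos (by omega), pvALoop.eq_def, if_neg hd]

-- ===== VERDICT (by name: the statement is the Claim_ definition above) =====
theorem get_max_spanning_tree_spec : Claim_equal_get_max_spanning_tree := by
  intro d k D _ _
  unfold Spec_get_max_spanning_tree get_max_spanning_tree get_max_spanning_tree_alt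
  rw [pvEdges_eq]
  exact pvLoop_eq d _ [] _ 0 (by simp)
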